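-- pv_equiv track=rewrite | github.com/alexisflesch/AMC-element | AMCelement.py | addEndQCM
-- ===== SOURCE A (Python) =====
-- def addEndQCM(texte):
--     """counts the number of curly braces and adds \end{qcm} where it should go"""
--     cpt = 1
--     res = ''
--     for i in texte:
--         if i=='}':
--             cpt -= 1
--         elif i=='{':
--             cpt += 1
--         if cpt==0:
--             res += r'\end{qcm}'
--             cpt = 1
--         else:
--             res += i
--     return res
-- ===== SOURCE B (Python) =====
-- def addEndQCM(texte):
--     """counts the number of curly braces and adds \end{qcm} where it should go"""
--     # One pass collecting the completed segments between balance-0 cuts (the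
--     # triggering '}' dropped), then a single join with the marker.
--     parts = []
--     start = 0
--     cpt = 1
--     for i, c in enumerate(texte):
--         if c == '}':
--             cpt -= 1
--         elif c == '{':
--             cpt += 1
--         if cpt == 0:
--             parts.append(texte[start:i])
--             start = i + 1
--             cpt = 1
--     if not parts:
--         return texte
--     parts.append(texte[start:])
--     return r'\end{qcm}'.join(parts)
-- ===== Notes on version B (the rewrite author's own statement) =====
-- stated objective: alternative
-- what changed: A accumulates the output string character by character inside the scan; B's single scan only records the completed segments as slices of the input (dropping each triggering '}') and the result is assembled afterwards by one join with the \end{qcm} marker (input returned unchanged when no cut occurs).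
import Mathlib
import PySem

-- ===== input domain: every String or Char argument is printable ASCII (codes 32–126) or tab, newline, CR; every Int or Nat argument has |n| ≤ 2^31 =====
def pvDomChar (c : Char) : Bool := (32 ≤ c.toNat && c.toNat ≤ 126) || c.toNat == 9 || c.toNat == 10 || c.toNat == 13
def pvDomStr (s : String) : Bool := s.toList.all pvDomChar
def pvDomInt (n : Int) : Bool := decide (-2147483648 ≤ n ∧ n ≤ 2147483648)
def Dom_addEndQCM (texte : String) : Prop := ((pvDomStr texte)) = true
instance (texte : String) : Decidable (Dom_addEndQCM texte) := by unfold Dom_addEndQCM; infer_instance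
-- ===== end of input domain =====

-- B replaces A's char-by-char string accumulation by one pass that collects the cut
-- segments as slices and a final join with the marker (alternative decomposition).

-- ===== PORT A =====
-- A: fold over the characters carrying (cpt, res); on balance 0 append the marker and reset.
def addEndQCM_step (s : Int × List Char) (c : Char) : Int × List Char :=
  let cpt := if c = '}' then s.1 - 1 else if c = '{' then s.1 + 1 else s.1
  if cpt = 0 then (1, s.2 ++ "\\end{qcm}".toList)
  else (cpt, s.2 ++ [c])

def addEndQCM (texte : String) : String :=
  String.ofList (texte.toList.foldl addEndQCM_step (1, ([] : List Char))).2

-- ===== PORT B =====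
-- B: enumerate pass carrying (parts, start, cpt); on balance 0 append the slice texte[start:i];
-- at the end either return texte unchanged (no cuts) or join parts ++ [texte[start:]] with the marker.
def addEndQCM_altStep (l : List Char) (s : List (List Char) × Int × Int) (p : Int × Char) :
    List (List Char) × Int × Int :=
  let cpt := if p.2 = '}' then s.2.2 - 1 else if p.2 = '{' then s.2.2 + 1 else s.2.2
  if cpt = 0 then (s.1 ++ [PySem.List.slice l (some s.2.1) (some p.1)], p.1 + 1, 1)
  else (s.1, s.2.1, cpt)

def addEndQCM_alt (texte : String) : String :=
  let l := texte.toList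
  let r := (PySem.List.enumerate l).foldl (addEndQCM_altStep l) ([], 0, 1)
  if r.1 = [] then texte
  else String.ofList
    (PySem.Chars.join "\\end{qcm}".toList (r.1 ++ [PySem.List.slice l (some r.2.1) none]))

-- ===== PRECONDITION & SPEC =====
def Spec_addEndQCM (texte : String) (out : String) : Prop := out = addEndQCM_alt texte
instance (texte : String) (out : String) : Decidable (Spec_addEndQCM texte out) := by unfold Spec_addEndQCM; infer_instance

-- ===== CLAIM (what is proved, stated in full; the proofs are below) =====
def Claim_equal_addEndQCM : Prop := ∀ (texte : String), Dom_addEndQCM texte → Spec_addEndQCM texte (addEndQCM texte)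

-- ===== LEMMAS AND PROOFS =====

-- the common value both ports compute, char by char
def pvEmit : Int → List Char → List Char
  | _, [] => []
  | cpt, c :: cs =>
    let cpt' := if c = '}' then cpt - 1 else if c = '{' then cpt + 1 else cpt
    if cpt' = 0 then "\\end{qcm}".toList ++ pvEmit 1 cs else c :: pvEmit cpt' cs

-- segment decomposition of the remaining text: (current segment, completed later segments)
def pvSegs : Int → List Char → List Char × List (List Char)
  | _, [] => ([], [])
  | cpt, c :: cs =>
    let cpt' := if c = '}' then cpt - 1 else if c = '{' then cpt + 1 else cpt
    if cpt' = 0 then ([], (pvSegs 1 cs).1 :: (pvSegs 1 cs).2)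
    else (c :: (pvSegs cpt' cs).1, (pvSegs cpt' cs).2)

theorem pvFoldA (cs : List Char) : ∀ (cpt : Int) (acc : List Char),
    (cs.foldl addEndQCM_step (cpt, acc)).2 = acc ++ pvEmit cpt cs := by
  induction cs with
  | nil => intro cpt acc; simp [pvEmit]
  | cons c cs ih =>
    intro cpt acc
    simp only [List.foldl_cons, addEndQCM_step, pvEmit]
    by_cases hcut : (if c = '}' then cpt - 1 else if c = '{' then cpt + 1 else cpt) = 0
    · simp [if_pos hcut, ih]
    · simp [if_neg hcut, ih]

theorem pvJoinSegs (cs : List Char) : ∀ (cpt : Int),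
    PySem.Chars.join "\\end{qcm}".toList ((pvSegs cpt cs).1 :: (pvSegs cpt cs).2)
      = pvEmit cpt cs := by
  induction cs with
  | nil => intro cpt; simp [pvSegs, pvEmit, PySem.Chars.join_singleton]
  | cons c cs ih =>
    intro cpt
    simp only [pvSegs, pvEmit]
    by_cases hcut : (if c = '}' then cpt - 1 else if c = '{' then cpt + 1 else cpt) = 0
    · simp only [if_pos hcut]
      rw [PySem.Chars.join_cons_cons, ih 1]
      simp
    · simp only [if_neg hcut]
      rcases h2 : (pvSegs (if c = '}' then cpt - 1 else if c = '{' then cpt + 1 else cpt) cs).2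
        with _ | ⟨b, t⟩
      · rw [← ih, h2, PySem.Chars.join_singleton, PySem.Chars.join_singleton]
      · rw [← ih, h2, PySem.Chars.join_cons_cons, PySem.Chars.join_cons_cons]
        simp

theorem pvSegs_single (cs : List Char) : ∀ (cpt : Int), (pvSegs cpt cs).2 = [] →
    (pvSegs cpt cs).1 = cs := by
  induction cs with
  | nil => intro cpt _; simp [pvSegs]
  | cons c cs ih =>
    intro cpt h
    simp only [pvSegs] at h ⊢
    by_cases hcut : (if c = '}' then cpt - 1 else if c = '{' then cpt + 1 else cpt) = 0
    · rw [if_pos hcut] at h; simp at h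
    · rw [if_neg hcut] at h ⊢
      simp only at h ⊢
      rw [ih _ h]

theorem pvFoldB (l : List Char) (cs : List Char) : ∀ (k j : Nat) (out : List (List Char)) (cpt : Int),
    l.drop k = cs → j ≤ k →
    ((PySem.List.enumerate cs (k : Int)).foldl (addEndQCM_altStep l) (out, (j : Int), cpt)).1
      ++ [PySem.List.slice l
            (some ((PySem.List.enumerate cs (k : Int)).foldl (addEndQCM_altStep l)
              (out, (j : Int), cpt)).2.1) none]
      = out ++ ((PySem.List.slice l (some (j : Int)) (some (k : Int)) ++ (pvSegs cpt cs).1)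
                 :: (pvSegs cpt cs).2) := by
  induction cs with
  | nil =>
    intro k j out cpt hk hjk
    have hlen : l.length ≤ k := List.drop_eq_nil_iff.mp hk
    simp only [PySem.List.enumerate_nil, List.foldl_nil, pvSegs,
      PySem.List.slice_from_natCast, PySem.List.slice_natCast]
    have : (List.drop j l).take (k - j) = List.drop j l := by
      apply List.take_of_length_le
      simp; omega
    simp [this]
  | cons c cs ih =>
    intro k j out cpt hk hjk
    have hlc : l[k]? = some c := by
      have h0 : (List.drop k l)[0]? = some c := by rw [hk]; rfl
      simpa using h0
    have hk' : l.drop (k + 1) = cs := by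
      have : l.drop (k + 1) = (l.drop k).drop 1 := by rw [List.drop_drop]
      simp [this, hk]
    have hcast : (k : Int) + 1 = ((k + 1 : Nat) : Int) := by push_cast; ring
    rw [PySem.List.enumerate_cons]
    simp only [List.foldl_cons, addEndQCM_altStep, pvSegs]
    by_cases hcut : (if c = '}' then cpt - 1 else if c = '{' then cpt + 1 else cpt) = 0
    · simp only [if_pos hcut]
      rw [hcast, ih (k + 1) (k + 1) _ 1 hk' (le_refl _)]
      have hkk : ∀ (a : Int), PySem.List.slice l (some a) (some a) = [] := fun a =>
        List.eq_nil_of_length_eq_zero (by simp [PySem.List.length_slice])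
      simp [hkk]
    · simp only [if_neg hcut]
      rw [hcast, ih (k + 1) j _ _ hk' (by omega)]
      have hslice : PySem.List.slice l (some (j : Int)) (some ((k + 1 : Nat) : Int))
          = PySem.List.slice l (some (j : Int)) (some (k : Int)) ++ [c] := by
        rw [PySem.List.slice_natCast, PySem.List.slice_natCast]
        have h1 : k + 1 - j = (k - j) + 1 := by omega
        rw [h1, List.take_add_one]
        have hg : (List.drop j l)[k - j]? = some c := by
          rw [List.getElem?_drop]
          have hjk2 : j + (k - j) = k := by omega
          rw [hjk2, hlc]
        simp [hg]
      rw [hslice]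
      simp

theorem addEndQCM_eq_emit (texte : String) :
    addEndQCM texte = String.ofList (pvEmit 1 texte.toList) := by
  unfold addEndQCM
  rw [pvFoldA]
  simp

theorem addEndQCM_alt_eq_emit (texte : String) :
    addEndQCM_alt texte = String.ofList (pvEmit 1 texte.toList) := by
  simp only [addEndQCM_alt]
  have h00 : PySem.List.slice texte.toList (some (0 : Int)) (some (0 : Int)) = [] := by
    simpa using PySem.List.slice_natCast texte.toList 0 0
  have h := pvFoldB texte.toList texte.toList 0 0 [] 1 (by simp) (le_refl 0)
  simp only [Nat.cast_zero, h00, List.nil_append] at h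
  by_cases hnil :
      ((PySem.List.enumerate texte.toList 0).foldl (addEndQCM_altStep texte.toList)
        ([], (0 : Int), 1)).1 = []
  · rw [if_pos hnil]
    rw [hnil, List.nil_append] at h
    have h2 : (pvSegs 1 texte.toList).2 = [] := by
      have := congrArg List.length h
      simpa using this.symm
    have h1 : (pvSegs 1 texte.toList).1 = texte.toList := pvSegs_single _ 1 h2
    have hemit : pvEmit 1 texte.toList = texte.toList := by
      rw [← pvJoinSegs, h2, h1, PySem.Chars.join_singleton]
    simp [hemit]
  · rw [if_neg hnil, h, pvJoinSegs]

-- ===== VERDICT (by name: the statement is the Claim_ definition above) =====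
theorem addEndQCM_spec : Claim_equal_addEndQCM := by
  intro texte _
  unfold Spec_addEndQCM
  rw [addEndQCM_eq_emit, addEndQCM_alt_eq_emit]
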